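-- pv_equiv track=rewrite | github.com/GitShanks14/Templates | BioInformatics/antibio.py | FindAllEncodings
-- ===== SOURCE A (Python) =====
-- def DnaToRna ( Dna ) :
--     Rna = ''
--     for i in Dna :
--         if ( i != 'T' ) :
--             Rna += i
--         else :
--             Rna += 'U'
--     return Rna
--
-- def ReverseComplementRna ( Text ) :
--     m = { 'A' : 'U' , 'U' : 'A' , 'G' : 'C' , 'C' : 'G' }
--     s = ''
--     for i in Text [ -1 :  : -1 ] :
--         s += m [ i ]
--     return s
--
-- def RnaTranslation ( Rna ) :
--     m = {"UUU":"F", "UUC":"F", "UUA":"L", "UUG":"L",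
--     "UCU":"S", "UCC":"S", "UCA":"S", "UCG":"S",
--     "UAU":"Y", "UAC":"Y", "UAA":"STOP", "UAG":"STOP",
--     "UGU":"C", "UGC":"C", "UGA":"STOP", "UGG":"W",
--     "CUU":"L", "CUC":"L", "CUA":"L", "CUG":"L",
--     "CCU":"P", "CCC":"P", "CCA":"P", "CCG":"P",
--     "CAU":"H", "CAC":"H", "CAA":"Q", "CAG":"Q",
--     "CGU":"R", "CGC":"R", "CGA":"R", "CGG":"R",
--     "AUU":"I", "AUC":"I", "AUA":"I", "AUG":"M",
--     "ACU":"T", "ACC":"T", "ACA":"T", "ACG":"T",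
--     "AAU":"N", "AAC":"N", "AAA":"K", "AAG":"K",
--     "AGU":"S", "AGC":"S", "AGA":"R", "AGG":"R",
--     "GUU":"V", "GUC":"V", "GUA":"V", "GUG":"V",
--     "GCU":"A", "GCC":"A", "GCA":"A", "GCG":"A",
--     "GAU":"D", "GAC":"D", "GAA":"E", "GAG":"E",
--     "GGU":"G", "GGC":"G", "GGA":"G", "GGG":"G"}
--     n = len ( Rna )
--     Protein = ''
--     i = 0
--     while ( i < n - 2 ) :
--         AminoAcid = m [ Rna[ i : i + 3 ] ]
--         if AminoAcid != 'STOP' :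
--             Protein += AminoAcid
--         else :
--             return Protein
--         i += 3
--     return Protein
--
-- def FindAllEncodings ( Dna , Peptide ) :
--     Rna = DnaToRna( Dna )
--     k = len ( Peptide ) * 3
--     n = len ( Dna )
--     substrings = [ ]
--     for i in range ( n - k + 1 ) :
--         s = Rna [ i : i + k ]
--         RNA = s
--         RNARC = ReverseComplementRna ( s )
--         if RnaTranslation ( RNA ) == Peptide or RnaTranslation ( RNARC ) == Peptide :
--             substrings . append ( Dna [ i : i + k ] )
--     return substrings
-- ===== SOURCE B (Python) =====
-- # B: transcribe once, translate the six reading frames once, and substring-search the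
-- # peptide in each frame protein, instead of translating every length-3L window (and its
-- # reverse complement) separately.  The genetic code is an indexed 64-character string
-- # (codon index = 16*i + 4*j + k over base indices U=0,C=1,A=2,G=3), not a dict;
-- # stop codons are '\x00' and codons with an unknown base '\x01', so they can never
-- # match a printable peptide.
--
-- _CODE = ("FFLLSSSSYY\x00\x00CC\x00W"
--          "LLLLPPPPHHQQRRRR"
--          "IIIMTTTTNNKKSSRR"
--          "VVVVAAAADDEEGGGG")
--
-- _BIDX = {'U': 0, 'C': 1, 'A': 2, 'G': 3}
--
--
-- def _bi(c):
--     return _BIDX.get(c, -1)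
--
--
-- def _aa(a, b, c):
--     i, j, k = _bi(a), _bi(b), _bi(c)
--     if i < 0 or j < 0 or k < 0:
--         return '\x01'
--     return _CODE[16 * i + 4 * j + k]
--
--
-- def _protein(rna):
--     return ''.join(_aa(rna[p], rna[p + 1], rna[p + 2])
--                    for p in range(0, len(rna) - 2, 3))
--
--
-- def _comp(c):
--     i = _bi(c)
--     return "AGUC"[i] if i >= 0 else c
--
--
-- def FindAllEncodings(Dna, Peptide):
--     n = len(Dna)
--     L = len(Peptide)
--     k = 3 * L
--     rna = ''.join('U' if c == 'T' else c for c in Dna)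
--     rc = ''.join(_comp(c) for c in reversed(rna))
--     hits = set()
--     for r in range(3):
--         prot = _protein(rna[r:])
--         j = prot.find(Peptide)
--         while j != -1:
--             i = r + 3 * j
--             if 0 <= i <= n - k:
--                 hits.add(i)
--             j = prot.find(Peptide, j + 1)
--         protrc = _protein(rc[r:])
--         j = protrc.find(Peptide)
--         while j != -1:
--             i = n - k - (r + 3 * j)
--             if 0 <= i <= n - k:
--                 hits.add(i)
--             j = protrc.find(Peptide, j + 1)
--     return [Dna[i:i + k] for i in sorted(hits)]
-- ===== Notes on version B (the rewrite author's own statement) =====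
-- stated objective: alternative
-- what changed: Instead of translating every length-3L window and its reverse complement with codon dicts, B transcribes once, translates the six reading frames once using an arithmetically indexed 64-character genetic-code string (codon index 16i+4j+k), substring-searches the peptide in each frame protein, and emits the matching window starts sorted.
import Mathlib
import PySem

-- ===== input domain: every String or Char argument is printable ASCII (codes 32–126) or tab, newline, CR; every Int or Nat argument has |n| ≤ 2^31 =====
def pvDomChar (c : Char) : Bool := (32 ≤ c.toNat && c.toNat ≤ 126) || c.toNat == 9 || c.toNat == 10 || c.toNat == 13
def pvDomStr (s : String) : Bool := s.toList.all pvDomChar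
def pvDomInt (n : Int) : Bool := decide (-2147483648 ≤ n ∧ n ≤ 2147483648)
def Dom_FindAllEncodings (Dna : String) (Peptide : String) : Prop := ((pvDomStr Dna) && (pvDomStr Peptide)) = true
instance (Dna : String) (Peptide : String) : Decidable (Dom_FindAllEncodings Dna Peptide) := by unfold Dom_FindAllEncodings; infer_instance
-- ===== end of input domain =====

-- B translates the six reading frames once (genetic code as an arithmetically indexed
-- 64-character string) and substring-searches the peptide there, instead of translating
-- every window and its reverse complement separately with codon dicts.

-- ===== PORT A =====

-- DnaToRna: character loop building the RNA string
def pvDnaToRna (l : List Char) : List Char :=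
  l.foldl (fun s c => s ++ [if c ≠ 'T' then c else 'U']) []

-- the dict m of ReverseComplementRna; m[i] raises KeyError outside AUGC — Pre_ excludes
-- every input reaching that, so the default 'A' is never used on admitted inputs
def pvCompA (c : Char) : Char :=
  if c = 'A' then 'U' else if c = 'U' then 'A' else if c = 'G' then 'C'
  else if c = 'C' then 'G' else 'A'

-- ReverseComplementRna: loop over Text[-1::-1] (reversal, cf. PySem.List.slice?_none_none_neg_one)
def pvRevCompRna (l : List Char) : List Char :=
  l.reverse.foldl (fun s c => s ++ [pvCompA c]) []

-- the codon dict of RnaTranslation; none encodes 'STOP'; the default (some 'A') is the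
-- KeyError case, never reached on admitted inputs
def pvAA (a b c : Char) : Option Char :=
  match a, b, c with
  | 'U','U','U' => some 'F' | 'U','U','C' => some 'F' | 'U','U','A' => some 'L' | 'U','U','G' => some 'L'
  | 'U','C','U' => some 'S' | 'U','C','C' => some 'S' | 'U','C','A' => some 'S' | 'U','C','G' => some 'S'
  | 'U','A','U' => some 'Y' | 'U','A','C' => some 'Y' | 'U','A','A' => none     | 'U','A','G' => none
  | 'U','G','U' => some 'C' | 'U','G','C' => some 'C' | 'U','G','A' => none     | 'U','G','G' => some 'W'
  | 'C','U','U' => some 'L' | 'C','U','C' => some 'L' | 'C','U','A' => some 'L' | 'C','U','G' => some 'L'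
  | 'C','C','U' => some 'P' | 'C','C','C' => some 'P' | 'C','C','A' => some 'P' | 'C','C','G' => some 'P'
  | 'C','A','U' => some 'H' | 'C','A','C' => some 'H' | 'C','A','A' => some 'Q' | 'C','A','G' => some 'Q'
  | 'C','G','U' => some 'R' | 'C','G','C' => some 'R' | 'C','G','A' => some 'R' | 'C','G','G' => some 'R'
  | 'A','U','U' => some 'I' | 'A','U','C' => some 'I' | 'A','U','A' => some 'I' | 'A','U','G' => some 'M'
  | 'A','C','U' => some 'T' | 'A','C','C' => some 'T' | 'A','C','A' => some 'T' | 'A','C','G' => some 'T'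
  | 'A','A','U' => some 'N' | 'A','A','C' => some 'N' | 'A','A','A' => some 'K' | 'A','A','G' => some 'K'
  | 'A','G','U' => some 'S' | 'A','G','C' => some 'S' | 'A','G','A' => some 'R' | 'A','G','G' => some 'R'
  | 'G','U','U' => some 'V' | 'G','U','C' => some 'V' | 'G','U','A' => some 'V' | 'G','U','G' => some 'V'
  | 'G','C','U' => some 'A' | 'G','C','C' => some 'A' | 'G','C','A' => some 'A' | 'G','C','G' => some 'A'
  | 'G','A','U' => some 'D' | 'G','A','C' => some 'D' | 'G','A','A' => some 'E' | 'G','A','G' => some 'E'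
  | 'G','G','U' => some 'G' | 'G','G','C' => some 'G' | 'G','G','A' => some 'G' | 'G','G','G' => some 'G'
  | _, _, _ => some 'A'

-- RnaTranslation: the 'while i < n - 2: … i += 3' loop with its early return at a STOP codon
def pvRnaTranslation : List Char → List Char
  | a :: b :: c :: rest =>
    match pvAA a b c with
    | some x => x :: pvRnaTranslation rest
    | none => []
  | _ => []

def FindAllEncodings (Dna : String) (Peptide : String) : List String :=
  let d := Dna.toList
  let rna := pvDnaToRna d
  let k : Int := 3 * (Peptide.toList.length : Int)
  let n : Int := (d.length : Int)
  (PySem.List.pyRange 0 (n - k + 1) 1).foldl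
    (fun subs i =>
      let s := PySem.List.slice rna (some i) (some (i + k))
      let rnarc := pvRevCompRna s
      if pvRnaTranslation s = Peptide.toList ∨ pvRnaTranslation rnarc = Peptide.toList then
        subs ++ [String.ofList (PySem.List.slice d (some i) (some (i + k)))]
      else subs) []

-- ===== PORT B =====

-- _CODE: the genetic code as one 64-character string, indexed by 16*i + 4*j + k
def pvCode : List Char :=
  "FFLLSSSSYY\x00\x00CC\x00WLLLLPPPPHHQQRRRRIIIMTTTTNNKKSSRRVVVVAAAADDEEGGGG".toList

-- _bi: base index U=0, C=1, A=2, G=3, else -1 (=_BIDX.get(c, -1))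
def pvBi (c : Char) : Int :=
  if c = 'U' then 0 else if c = 'C' then 1 else if c = 'A' then 2
  else if c = 'G' then 3 else -1

-- _aa: _CODE[16*i+4*j+k]; the index is always in 0..63 there, so getD's default is unreachable
def pvAAB (a b c : Char) : Char :=
  let i := pvBi a
  let j := pvBi b
  let k := pvBi c
  if i < 0 ∨ j < 0 ∨ k < 0 then '\x01'
  else pvCode.getD (16 * i + 4 * j + k).toNat '\x01'

-- _protein: full-frame translation, one amino acid per codon
def pvProtein : List Char → List Char
  | a :: b :: c :: rest => pvAAB a b c :: pvProtein rest
  | _ => []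

-- _comp: "AGUC"[_bi(c)] if _bi(c) >= 0 else c (index in 0..3 there, getD default unreachable)
def pvCompB (c : Char) : Char :=
  let i := pvBi c
  if 0 ≤ i then ("AGUC".toList).getD i.toNat c else c

-- the 'j = prot.find(Peptide); while j != -1: …; j = prot.find(Peptide, j+1)' loop:
-- every position j (0-based, as Int) with Peptide a prefix of prot[j:], in increasing order
def pvOccs (pat : List Char) : List Char → List Int
  | [] => if pat.isPrefixOf ([] : List Char) then [(0 : Int)] else []
  | c :: t => (if pat.isPrefixOf (c :: t) then [(0 : Int)] else []) ++ (pvOccs pat t).map (· + 1)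

def FindAllEncodings_alt (Dna : String) (Peptide : String) : List String :=
  let d := Dna.toList
  let p := Peptide.toList
  let n : Int := (d.length : Int)
  let L : Int := (p.length : Int)
  let k : Int := 3 * L
  let rna := d.map (fun c => if c = 'T' then 'U' else c)
  let rc := rna.reverse.map pvCompB
  let hits : PySem.Set Int := ([0, 1, 2] : List Int).foldl
    (fun hs r =>
      let hs1 := (pvOccs p (pvProtein (PySem.List.slice rna (some r) none))).foldl
        (fun hs j =>
          let i := r + 3 * j
          if 0 ≤ i ∧ i ≤ n - k then hs.add i else hs) hs
      (pvOccs p (pvProtein (PySem.List.slice rc (some r) none))).foldl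
        (fun hs j =>
          let i := n - k - (r + 3 * j)
          if 0 ≤ i ∧ i ≤ n - k then hs.add i else hs) hs1)
    (PySem.Set.ofList [])
  (PySem.List.sorted hits (fun x => x) false).map
    (fun i => String.ofList (PySem.List.slice d (some i) (some (i + k))))

-- ===== PRECONDITION & SPEC =====

-- Pre_ excludes exactly the inputs where A raises KeyError: some character of Dna outside
-- 'ACGTU' while the peptide is nonempty and at least one window exists (then some window
-- reaches ReverseComplementRna/RnaTranslation on an unknown character).
def Pre_FindAllEncodings (Dna : String) (Peptide : String) : Prop :=
  Dna.toList.all (fun c => (['A', 'C', 'G', 'T', 'U'] : List Char).contains c) = true ∨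
  Peptide.toList.length = 0 ∨
  Dna.toList.length < 3 * Peptide.toList.length
instance (Dna : String) (Peptide : String) : Decidable (Pre_FindAllEncodings Dna Peptide) := by
  unfold Pre_FindAllEncodings; infer_instance

def pvWitness_FindAllEncodings : String × String := ("ATGGCC", "MA")

def Spec_FindAllEncodings (Dna : String) (Peptide : String) (out : List String) : Prop :=
  out = FindAllEncodings_alt Dna Peptide
instance (Dna : String) (Peptide : String) (out : List String) : Decidable (Spec_FindAllEncodings Dna Peptide out) := by
  unfold Spec_FindAllEncodings; infer_instance

-- ===== CLAIM (what is proved, stated in full; the proofs are below) =====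
def Claim_equal_FindAllEncodings : Prop := ∀ (Dna : String) (Peptide : String), Dom_FindAllEncodings Dna Peptide → Pre_FindAllEncodings Dna Peptide → Spec_FindAllEncodings Dna Peptide (FindAllEncodings Dna Peptide)

-- ===== LEMMAS AND PROOFS =====

-- RNA alphabet on admitted inputs
def pvRL : List Char := ['A', 'U', 'G', 'C']

lemma pv_dnaToRna_eq (l : List Char) :
    pvDnaToRna l = l.map (fun c => if c = 'T' then 'U' else c) := by
  unfold pvDnaToRna
  rw [PySem.List.foldl_append_singleton_eq_map (fun c => if c ≠ 'T' then c else 'U') l []]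
  simp only [List.nil_append]
  exact List.map_congr_left (fun c _ => by by_cases h : c = 'T' <;> simp [h])

lemma pv_revComp_eq (l : List Char) : pvRevCompRna l = l.reverse.map pvCompA := by
  unfold pvRevCompRna
  rw [PySem.List.foldl_append_singleton_eq_map]
  simp

lemma pv_aa_rel : ∀ a ∈ pvRL, ∀ b ∈ pvRL, ∀ c ∈ pvRL,
    pvAAB a b c = (pvAA a b c).getD '\x00' ∧
    (pvAA a b c).getD 'F' ≠ '\x00' ∧ (pvAA a b c).getD 'F' ≠ '\x01' := by
  intro a ha b hb c hc
  fin_cases ha <;> fin_cases hb <;> fin_cases hc <;> decide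

lemma pv_comp_rel : ∀ c ∈ pvRL, pvCompA c = pvCompB c ∧ pvCompB c ∈ pvRL := by
  intro c hc; fin_cases hc <;> decide

lemma pv_tr_mem : ∀ c ∈ (['A', 'C', 'G', 'T', 'U'] : List Char),
    (if c = 'T' then 'U' else c) ∈ pvRL := by
  intro c hc; fin_cases hc <;> decide

lemma pv_trans_iff : ∀ (p w : List Char), w.length = 3 * p.length →
    (∀ c ∈ w, c ∈ pvRL) → (∀ q ∈ p, pvDomChar q = true) →
    (pvRnaTranslation w = p ↔ pvProtein w = p) := by
  intro p
  induction p with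
  | nil =>
    intro w hl _ _
    have hl' : w.length = 0 := by simpa using hl
    have hw : w = [] := List.eq_nil_of_length_eq_zero hl'
    subst hw; simp [pvRnaTranslation, pvProtein]
  | cons q p ih =>
    intro w hl hw hp
    rcases w with _ | ⟨a, _ | ⟨b, _ | ⟨c, rest⟩⟩⟩
    · simp at hl
    · simp at hl; omega
    · simp at hl; omega
    · have ha := hw a (by simp); have hb := hw b (by simp); have hc := hw c (by simp)
      have h64 := pv_aa_rel a ha b hb c hc
      have hq : pvDomChar q = true := hp q (by simp)
      have hrest : (pvRnaTranslation rest = p ↔ pvProtein rest = p) :=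
        ih rest (by simp at hl ⊢; omega) (fun y hy => hw y (by simp [hy]))
          (fun y hy => hp y (by simp [hy]))
      cases hAA : pvAA a b c with
      | none =>
        have hB : pvAAB a b c = '\x00' := by rw [h64.1, hAA]; rfl
        simp only [pvRnaTranslation, pvProtein, hAA, hB]
        constructor
        · intro h; exact absurd h (by simp)
        · intro h
          have hq0 : q = '\x00' := (List.cons_eq_cons.mp h).1.symm
          subst hq0; exact absurd hq (by decide)
      | some x =>
        have hB : pvAAB a b c = x := by rw [h64.1, hAA]; rfl
        simp only [pvRnaTranslation, pvProtein, hAA, hB, List.cons_eq_cons]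
        exact and_congr Iff.rfl hrest

lemma pv_prot_take : ∀ (L : Nat) (y : List Char),
    pvProtein (y.take (3 * L)) = (pvProtein y).take L := by
  intro L
  induction L with
  | zero => intro y; simp [pvProtein]
  | succ L ih =>
    intro y
    rcases y with _ | ⟨a, _ | ⟨b, _ | ⟨c, rest⟩⟩⟩
    · simp [pvProtein]
    · rw [List.take_of_length_le (by simp; omega)]; simp [pvProtein]
    · rw [List.take_of_length_le (by simp; omega)]; simp [pvProtein]
    · have h3 : 3 * (L + 1) = ((3 * L) + 1 + 1 + 1) := by ring
      rw [h3]
      simp only [List.take_succ_cons, pvProtein, ih]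

lemma pv_prot_drop : ∀ (j : Nat) (y : List Char),
    pvProtein (y.drop (3 * j)) = (pvProtein y).drop j := by
  intro j
  induction j with
  | zero => intro y; simp
  | succ j ih =>
    intro y
    rcases y with _ | ⟨a, _ | ⟨b, _ | ⟨c, rest⟩⟩⟩
    · simp [pvProtein]
    · rw [List.drop_of_length_le (by simp; omega)]; simp [pvProtein]
    · rw [List.drop_of_length_le (by simp; omega)]; simp [pvProtein]
    · have h3 : 3 * (j + 1) = ((3 * j) + 1 + 1 + 1) := by ring
      rw [h3]
      simp only [List.drop_succ_cons, pvProtein, ih]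

lemma pv_prot_len : ∀ (y : List Char), (pvProtein y).length = y.length / 3 := by
  intro y
  induction y using pvProtein.induct with
  | case1 a b c rest ih => simp only [pvProtein, List.length_cons, ih]; omega
  | case2 y h =>
    rcases y with _ | ⟨a, _ | ⟨b, _ | ⟨c, rest⟩⟩⟩
    · simp [pvProtein]
    · simp [pvProtein]
    · simp [pvProtein]
    · exact absurd rfl (h a b c rest)

lemma pv_frame (xs p : List Char) (r j : Nat) :
    pvProtein ((xs.drop (r + 3 * j)).take (3 * p.length)) = p ↔
      p <+: (pvProtein (xs.drop r)).drop j := by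
  rw [List.prefix_iff_eq_take]
  rw [← List.drop_drop]
  rw [pv_prot_take, pv_prot_drop]
  exact eq_comm

lemma pv_mem_occs (pat : List Char) : ∀ (l : List Char) (x : Int),
    x ∈ pvOccs pat l ↔ ∃ j : Nat, x = (j : Int) ∧ j ≤ l.length ∧ pat <+: l.drop j := by
  intro l
  induction l with
  | nil =>
    intro x
    simp only [pvOccs, List.isPrefixOf_iff_prefix]
    by_cases h : pat <+: ([] : List Char)
    · simp only [if_pos h, List.mem_singleton]
      constructor
      · rintro rfl; exact ⟨0, rfl, by simp, h⟩
      · rintro ⟨j, rfl, hj, _⟩; simp at hj; simp [hj]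
    · simp only [if_neg h, List.not_mem_nil, false_iff]
      rintro ⟨j, rfl, hj, hpre⟩
      simp at hj; subst hj; exact h hpre
  | cons c t ih =>
    intro x
    simp only [pvOccs, List.isPrefixOf_iff_prefix, List.mem_append, List.mem_map]
    constructor
    · rintro (h0 | ⟨y, hy, rfl⟩)
      · have hx : x = 0 ∧ pat <+: c :: t := by
          by_cases h : pat <+: c :: t
          · simp [if_pos h] at h0; exact ⟨h0, h⟩
          · simp [if_neg h] at h0
        exact ⟨0, by simp [hx.1], by simp, by simpa using hx.2⟩
      · obtain ⟨j, rfl, hj, hpre⟩ := (ih y).mp hy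
        exact ⟨j + 1, by push_cast; ring, by simp; omega, by simpa using hpre⟩
    · rintro ⟨j, rfl, hj, hpre⟩
      cases j with
      | zero => left; simp at hpre; simp [if_pos hpre]
      | succ j =>
        right
        refine ⟨(j : Int), (ih _).mpr ⟨j, rfl, by simp at hj; omega, by simpa using hpre⟩, by push_cast; ring⟩

lemma pv_mem_foldl_add (f : Int → Int) (m : Int) :
    ∀ (l : List Int) (s : PySem.Set Int) (x : Int),
      (x ∈ l.foldl (fun hs j => if 0 ≤ f j ∧ f j ≤ m then PySem.Set.add hs (f j) else hs) s) ↔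
      x ∈ s ∨ ∃ j ∈ l, x = f j ∧ 0 ≤ f j ∧ f j ≤ m := by
  intro l
  induction l with
  | nil => intro s x; simp
  | cons a t ih =>
    intro s x
    simp only [List.foldl_cons]
    rw [ih]
    by_cases h : 0 ≤ f a ∧ f a ≤ m
    · rw [if_pos h]
      rw [PySem.Set.mem_add]
      constructor
      · rintro ((hs | rfl) | hex)
        · exact Or.inl hs
        · exact Or.inr ⟨a, by simp, rfl, h⟩
        · obtain ⟨j, hj, hx⟩ := hex; exact Or.inr ⟨j, by simp [hj], hx⟩
      · rintro (hs | ⟨j, hj, hx⟩)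
        · exact Or.inl (Or.inl hs)
        · rcases List.mem_cons.mp hj with rfl | hj'
          · exact Or.inl (Or.inr hx.1)
          · exact Or.inr ⟨j, hj', hx⟩
    · rw [if_neg h]
      constructor
      · rintro (hs | ⟨j, hj, hx⟩)
        · exact Or.inl hs
        · exact Or.inr ⟨j, by simp [hj], hx⟩
      · rintro (hs | ⟨j, hj, hx⟩)
        · exact Or.inl hs
        · rcases List.mem_cons.mp hj with rfl | hj'
          · exact absurd hx.2 h
          · exact Or.inr ⟨j, hj', hx⟩

lemma pv_nodup_foldl_add (f : Int → Int) (m : Int) :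
    ∀ (l : List Int) (s : PySem.Set Int), s.Nodup →
      (l.foldl (fun hs j => if 0 ≤ f j ∧ f j ≤ m then PySem.Set.add hs (f j) else hs) s).Nodup := by
  intro l
  induction l with
  | nil => intro s hs; simpa using hs
  | cons a t ih =>
    intro s hs
    simp only [List.foldl_cons]
    by_cases h : 0 ≤ f a ∧ f a ≤ m
    · rw [if_pos h]; exact ih _ (PySem.Set.nodup_add s (f a) hs)
    · rw [if_neg h]; exact ih _ hs

def pvHits (d p : List Char) : PySem.Set Int :=
  let n : Int := (d.length : Int)
  let L : Int := (p.length : Int)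
  let k : Int := 3 * L
  let rna := d.map (fun c => if c = 'T' then 'U' else c)
  let rc := rna.reverse.map pvCompB
  ([0, 1, 2] : List Int).foldl
    (fun hs r =>
      let hs1 := (pvOccs p (pvProtein (PySem.List.slice rna (some r) none))).foldl
        (fun hs j =>
          let i := r + 3 * j
          if 0 ≤ i ∧ i ≤ n - k then hs.add i else hs) hs
      (pvOccs p (pvProtein (PySem.List.slice rc (some r) none))).foldl
        (fun hs j =>
          let i := n - k - (r + 3 * j)
          if 0 ≤ i ∧ i ≤ n - k then hs.add i else hs) hs1)
    (PySem.Set.ofList [])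

lemma pv_alt_eq (Dna Peptide : String) :
    FindAllEncodings_alt Dna Peptide =
      (PySem.List.sorted (pvHits Dna.toList Peptide.toList) (fun x => x) false).map
        (fun i => String.ofList (PySem.List.slice Dna.toList (some i)
          (some (i + 3 * (Peptide.toList.length : Int))))) := rfl

lemma pv_foldl_append_ite {P : Int → Prop} [DecidablePred P] (f : Int → String) (l : List Int) :
    l.foldl (fun acc i => if P i then acc ++ [f i] else acc) [] =
      (l.filter (fun i => decide (P i))).map f := by
  have h := PySem.List.foldl_append_if (fun i => decide (P i)) f l []
  simpa using h

lemma pv_A_eq (Dna Peptide : String) :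
    FindAllEncodings Dna Peptide =
      ((PySem.List.pyRange 0 ((Dna.toList.length : Int) - 3 * (Peptide.toList.length : Int) + 1) 1).filter
        (fun i => decide
          (pvRnaTranslation (PySem.List.slice (pvDnaToRna Dna.toList) (some i)
              (some (i + 3 * (Peptide.toList.length : Int)))) = Peptide.toList ∨
           pvRnaTranslation (pvRevCompRna (PySem.List.slice (pvDnaToRna Dna.toList) (some i)
              (some (i + 3 * (Peptide.toList.length : Int))))) = Peptide.toList))).map
        (fun i => String.ofList (PySem.List.slice Dna.toList (some i)
          (some (i + 3 * (Peptide.toList.length : Int))))) := by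
  have hA : FindAllEncodings Dna Peptide =
    (PySem.List.pyRange 0 ((Dna.toList.length : Int) - 3 * (Peptide.toList.length : Int) + 1) 1).foldl
      (fun subs i =>
        if pvRnaTranslation (PySem.List.slice (pvDnaToRna Dna.toList) (some i)
              (some (i + 3 * (Peptide.toList.length : Int)))) = Peptide.toList ∨
           pvRnaTranslation (pvRevCompRna (PySem.List.slice (pvDnaToRna Dna.toList) (some i)
              (some (i + 3 * (Peptide.toList.length : Int))))) = Peptide.toList
        then subs ++ [String.ofList (PySem.List.slice Dna.toList (some i)
              (some (i + 3 * (Peptide.toList.length : Int))))]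
        else subs) [] := rfl
  rw [hA, pv_foldl_append_ite]

lemma pv_rev_window (x : List Char) (i k : Nat) (h : i + k ≤ x.length) :
    ((x.drop i).take k).reverse = (x.reverse.drop (x.length - i - k)).take k := by
  rw [List.reverse_take, List.reverse_drop, List.length_drop, List.drop_take]
  congr 1
  omega

lemma pv_window_iff (y p : List Char) (m : Nat) (hm : m ≤ y.length) :
    pvProtein ((y.drop m).take (3 * p.length)) = p ↔
      ∃ r j : Nat, r < 3 ∧ m = r + 3 * j ∧ j ≤ (pvProtein (y.drop r)).length ∧
        p <+: (pvProtein (y.drop r)).drop j := by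
  constructor
  · intro h
    have hlen := pv_prot_len (y.drop (m % 3))
    rw [List.length_drop] at hlen
    refine ⟨m % 3, m / 3, Nat.mod_lt _ (by norm_num), by omega, by omega, ?_⟩
    refine (pv_frame y p (m % 3) (m / 3)).mp ?_
    rw [show m % 3 + 3 * (m / 3) = m by omega]
    exact h
  · rintro ⟨r, j, _, rfl, _, hpre⟩
    exact (pv_frame y p r j).mpr hpre

lemma pv_mem_hits (d p : List Char) (x : Int) :
    x ∈ pvHits d p ↔
      (0 ≤ x ∧ x ≤ (d.length : Int) - 3 * (p.length : Int)) ∧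
      (pvProtein (((d.map (fun c => if c = 'T' then 'U' else c)).drop x.toNat).take (3 * p.length)) = p ∨
       pvProtein ((((d.map (fun c => if c = 'T' then 'U' else c)).reverse.map pvCompB).drop
           (d.length - 3 * p.length - x.toNat)).take (3 * p.length)) = p) := by
  have h0 : ((0 : Int)) ≤ 0 := le_refl 0
  have h1 : ((0 : Int)) ≤ 1 := by norm_num
  have h2 : ((0 : Int)) ≤ 2 := by norm_num
  unfold pvHits
  simp only [List.foldl_cons, List.foldl_nil]
  rw [PySem.List.slice_from _ h0, PySem.List.slice_from _ h1, PySem.List.slice_from _ h2,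
      PySem.List.slice_from _ h0, PySem.List.slice_from _ h1, PySem.List.slice_from _ h2]
  simp only [show ((0 : Int).toNat = 0) from rfl, show ((1 : Int).toNat = 1) from rfl,
      show ((2 : Int).toNat = 2) from rfl]
  rw [pv_mem_foldl_add (fun j => (d.length : Int) - 3 * (p.length : Int) - (2 + 3 * j))
        ((d.length : Int) - 3 * (p.length : Int)),
      pv_mem_foldl_add (fun j => 2 + 3 * j) ((d.length : Int) - 3 * (p.length : Int)),
      pv_mem_foldl_add (fun j => (d.length : Int) - 3 * (p.length : Int) - (1 + 3 * j))
        ((d.length : Int) - 3 * (p.length : Int)),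
      pv_mem_foldl_add (fun j => 1 + 3 * j) ((d.length : Int) - 3 * (p.length : Int)),
      pv_mem_foldl_add (fun j => (d.length : Int) - 3 * (p.length : Int) - (0 + 3 * j))
        ((d.length : Int) - 3 * (p.length : Int)),
      pv_mem_foldl_add (fun j => 0 + 3 * j) ((d.length : Int) - 3 * (p.length : Int))]
  rw [PySem.Set.mem_ofList]
  simp only [List.not_mem_nil, false_or]
  constructor
  · rintro ((((((⟨jI, hjo, hxe, hg1, hg2⟩ | ⟨jI, hjo, hxe, hg1, hg2⟩) | ⟨jI, hjo, hxe, hg1, hg2⟩) |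
        ⟨jI, hjo, hxe, hg1, hg2⟩) | ⟨jI, hjo, hxe, hg1, hg2⟩) | ⟨jI, hjo, hxe, hg1, hg2⟩))
    · obtain ⟨j, rfl, hjle, hpre⟩ := (pv_mem_occs _ _ _).mp hjo
      refine ⟨⟨by omega, by omega⟩, Or.inl ?_⟩
      rw [show x.toNat = 0 + 3 * j by omega]
      exact (pv_frame _ p 0 j).mpr hpre
    · obtain ⟨j, rfl, hjle, hpre⟩ := (pv_mem_occs _ _ _).mp hjo
      refine ⟨⟨by omega, by omega⟩, Or.inr ?_⟩
      rw [show d.length - 3 * p.length - x.toNat = 0 + 3 * j by omega]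
      exact (pv_frame _ p 0 j).mpr hpre
    · obtain ⟨j, rfl, hjle, hpre⟩ := (pv_mem_occs _ _ _).mp hjo
      refine ⟨⟨by omega, by omega⟩, Or.inl ?_⟩
      rw [show x.toNat = 1 + 3 * j by omega]
      exact (pv_frame _ p 1 j).mpr hpre
    · obtain ⟨j, rfl, hjle, hpre⟩ := (pv_mem_occs _ _ _).mp hjo
      refine ⟨⟨by omega, by omega⟩, Or.inr ?_⟩
      rw [show d.length - 3 * p.length - x.toNat = 1 + 3 * j by omega]
      exact (pv_frame _ p 1 j).mpr hpre
    · obtain ⟨j, rfl, hjle, hpre⟩ := (pv_mem_occs _ _ _).mp hjo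
      refine ⟨⟨by omega, by omega⟩, Or.inl ?_⟩
      rw [show x.toNat = 2 + 3 * j by omega]
      exact (pv_frame _ p 2 j).mpr hpre
    · obtain ⟨j, rfl, hjle, hpre⟩ := (pv_mem_occs _ _ _).mp hjo
      refine ⟨⟨by omega, by omega⟩, Or.inr ?_⟩
      rw [show d.length - 3 * p.length - x.toNat = 2 + 3 * j by omega]
      exact (pv_frame _ p 2 j).mpr hpre
  · rintro ⟨⟨hx0, hxle⟩, hcore⟩
    rcases hcore with hfwd | hrcc
    · obtain ⟨r, j, hr3, hmr, hjle, hpre⟩ :=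
        (pv_window_iff _ p x.toNat (by simp; omega)).mp hfwd
      interval_cases r
      · exact Or.inl (Or.inl (Or.inl (Or.inl (Or.inl ⟨(j : Int),
          (pv_mem_occs _ _ _).mpr ⟨j, rfl, hjle, hpre⟩, by omega, by omega, by omega⟩))))
      · exact Or.inl (Or.inl (Or.inl (Or.inr ⟨(j : Int),
          (pv_mem_occs _ _ _).mpr ⟨j, rfl, hjle, hpre⟩, by omega, by omega, by omega⟩)))
      · exact Or.inl (Or.inr ⟨(j : Int),
          (pv_mem_occs _ _ _).mpr ⟨j, rfl, hjle, hpre⟩, by omega, by omega, by omega⟩)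
    · obtain ⟨r, j, hr3, hmr, hjle, hpre⟩ :=
        (pv_window_iff _ p (d.length - 3 * p.length - x.toNat) (by simp; omega)).mp hrcc
      interval_cases r
      · exact Or.inl (Or.inl (Or.inl (Or.inl (Or.inr ⟨(j : Int),
          (pv_mem_occs _ _ _).mpr ⟨j, rfl, hjle, hpre⟩, by omega, by omega, by omega⟩))))
      · exact Or.inl (Or.inl (Or.inr ⟨(j : Int),
          (pv_mem_occs _ _ _).mpr ⟨j, rfl, hjle, hpre⟩, by omega, by omega, by omega⟩))
      · exact Or.inr ⟨(j : Int),
          (pv_mem_occs _ _ _).mpr ⟨j, rfl, hjle, hpre⟩, by omega, by omega, by omega⟩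

lemma pv_nodup_hits (d p : List Char) : (pvHits d p).Nodup := by
  unfold pvHits
  simp only [List.foldl_cons, List.foldl_nil]
  apply pv_nodup_foldl_add (fun j => (d.length : Int) - 3 * (p.length : Int) - (2 + 3 * j))
  apply pv_nodup_foldl_add (fun j => 2 + 3 * j)
  apply pv_nodup_foldl_add (fun j => (d.length : Int) - 3 * (p.length : Int) - (1 + 3 * j))
  apply pv_nodup_foldl_add (fun j => 1 + 3 * j)
  apply pv_nodup_foldl_add (fun j => (d.length : Int) - 3 * (p.length : Int) - (0 + 3 * j))
  apply pv_nodup_foldl_add (fun j => 0 + 3 * j)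
  exact PySem.Set.nodup_ofList []

lemma pv_cond_iff (d p : List Char)
    (hpre : (∀ c ∈ d, c ∈ (['A', 'C', 'G', 'T', 'U'] : List Char)) ∨ p.length = 0)
    (hdomp : ∀ q ∈ p, pvDomChar q = true)
    (m : Nat) (hm : m ≤ d.length - 3 * p.length) (hkn : 3 * p.length ≤ d.length) :
    (pvRnaTranslation (((d.map (fun c => if c = 'T' then 'U' else c)).drop m).take (3 * p.length)) = p ↔
     pvProtein (((d.map (fun c => if c = 'T' then 'U' else c)).drop m).take (3 * p.length)) = p) := by
  rcases hpre with hACGT | hL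
  · have hrna : ∀ c ∈ d.map (fun c => if c = 'T' then 'U' else c), c ∈ pvRL := by
      intro c hc
      obtain ⟨a, ha, rfl⟩ := List.mem_map.mp hc
      exact pv_tr_mem a (hACGT a ha)
    refine pv_trans_iff p _ ?_ ?_ hdomp
    · simp only [List.length_take, List.length_drop, List.length_map]
      omega
    · intro c hc
      exact hrna c (List.mem_of_mem_drop (List.mem_of_mem_take hc))
  · have hp0 : p = [] := List.eq_nil_of_length_eq_zero hL
    subst hp0
    simp [pvRnaTranslation, pvProtein]

lemma pv_cond_iff_rc (d p : List Char)
    (hpre : (∀ c ∈ d, c ∈ (['A', 'C', 'G', 'T', 'U'] : List Char)) ∨ p.length = 0)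
    (hdomp : ∀ q ∈ p, pvDomChar q = true)
    (m : Nat) (hm : m ≤ d.length - 3 * p.length) (hkn : 3 * p.length ≤ d.length) :
    (pvRnaTranslation (pvRevCompRna
        (((d.map (fun c => if c = 'T' then 'U' else c)).drop m).take (3 * p.length))) = p ↔
     pvProtein ((((d.map (fun c => if c = 'T' then 'U' else c)).reverse.map pvCompB).drop
        (d.length - 3 * p.length - m)).take (3 * p.length)) = p) := by
  rcases hpre with hACGT | hL
  · have hrna : ∀ c ∈ d.map (fun c => if c = 'T' then 'U' else c), c ∈ pvRL := by
      intro c hc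
      obtain ⟨a, ha, rfl⟩ := List.mem_map.mp hc
      exact pv_tr_mem a (hACGT a ha)
    rw [pv_revComp_eq]
    rw [List.map_congr_left (fun c hc => (pv_comp_rel c (hrna c
      (List.mem_of_mem_drop (List.mem_of_mem_take (List.mem_reverse.mp hc))))).1)]
    rw [pv_rev_window _ m (3 * p.length) (by simp only [List.length_map]; omega)]
    rw [List.map_take, List.map_drop]
    rw [show (d.map (fun c => if c = 'T' then 'U' else c)).length - m - 3 * p.length =
        d.length - 3 * p.length - m by simp only [List.length_map]; omega]
    refine pv_trans_iff p _ ?_ ?_ hdomp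
    · simp only [List.length_take, List.length_drop, List.length_map, List.length_reverse]
      omega
    · intro c hc
      have hc' := List.mem_of_mem_drop (List.mem_of_mem_take hc)
      obtain ⟨a, ha, rfl⟩ := List.mem_map.mp hc'
      exact (pv_comp_rel a (hrna a (List.mem_reverse.mp ha))).2
  · have hp0 : p = [] := List.eq_nil_of_length_eq_zero hL
    subst hp0
    simp [pvRnaTranslation, pvProtein, pvRevCompRna]

-- ===== VERDICT (by name: the statement is the Claim_ definition above) =====
theorem FindAllEncodings_spec : Claim_equal_FindAllEncodings := by
  intro Dna Peptide hdom hpre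
  unfold Spec_FindAllEncodings
  rw [pv_A_eq, pv_alt_eq]
  have hdomp : ∀ q ∈ Peptide.toList, pvDomChar q = true := by
    unfold Dom_FindAllEncodings pvDomStr at hdom
    rw [Bool.and_eq_true] at hdom
    exact List.all_eq_true.mp hdom.2
  have hpre' : (∀ c ∈ Dna.toList, c ∈ (['A', 'C', 'G', 'T', 'U'] : List Char)) ∨
      Peptide.toList.length = 0 ∨ Dna.toList.length < 3 * Peptide.toList.length := by
    unfold Pre_FindAllEncodings at hpre
    rcases hpre with h | h | h
    · left; intro c hc
      have := List.all_eq_true.mp h c hc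
      simpa using this
    · right; left; exact h
    · right; right; exact h
  have hsorted : PySem.List.sorted (pvHits Dna.toList Peptide.toList) (fun x => x) false =
      (PySem.List.pyRange 0 ((Dna.toList.length : Int) - 3 * (Peptide.toList.length : Int) + 1) 1).filter
        (fun i => decide ((0 ≤ i ∧ i ≤ (Dna.toList.length : Int) - 3 * (Peptide.toList.length : Int)) ∧
          (pvProtein (((Dna.toList.map (fun c => if c = 'T' then 'U' else c)).drop i.toNat).take
              (3 * Peptide.toList.length)) = Peptide.toList ∨
           pvProtein ((((Dna.toList.map (fun c => if c = 'T' then 'U' else c)).reverse.map pvCompB).drop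
              (Dna.toList.length - 3 * Peptide.toList.length - i.toNat)).take
              (3 * Peptide.toList.length)) = Peptide.toList))) := by
    apply PySem.List.sorted_eq_of_perm_of_pairwise_lt
    · rw [List.perm_ext_iff_of_nodup (List.Nodup.filter _ (PySem.List.nodup_pyRange_one _ _))
        (pv_nodup_hits Dna.toList Peptide.toList)]
      intro a
      rw [List.mem_filter, pv_mem_hits, decide_eq_true_eq, PySem.List.mem_pyRange_one]
      constructor
      · rintro ⟨_, h⟩; exact h
      · rintro ⟨hg, hcore⟩; exact ⟨⟨hg.1, by omega⟩, hg, hcore⟩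
    · exact List.Pairwise.filter _ (PySem.List.pairwise_lt_pyRange_one _ _)
  rw [hsorted]
  congr 1
  apply List.filter_congr
  intro x hx
  rw [PySem.List.mem_pyRange_one] at hx
  have hg : 0 ≤ x ∧ x ≤ (Dna.toList.length : Int) - 3 * (Peptide.toList.length : Int) :=
    ⟨hx.1, by omega⟩
  have hkn : 3 * Peptide.toList.length ≤ Dna.toList.length := by omega
  have hm : x.toNat ≤ Dna.toList.length - 3 * Peptide.toList.length := by omega
  have hpre2 : (∀ c ∈ Dna.toList, c ∈ (['A', 'C', 'G', 'T', 'U'] : List Char)) ∨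
      Peptide.toList.length = 0 := by
    rcases hpre' with h | h | h
    · exact Or.inl h
    · exact Or.inr h
    · omega
  rw [decide_eq_decide]
  rw [pv_dnaToRna_eq]
  rw [show PySem.List.slice (Dna.toList.map (fun c => if c = 'T' then 'U' else c)) (some x)
        (some (x + 3 * (Peptide.toList.length : Int))) =
      ((Dna.toList.map (fun c => if c = 'T' then 'U' else c)).drop x.toNat).take
        (3 * Peptide.toList.length) from by
    rw [PySem.List.slice_toNat _ hx.1 (by omega)]
    congr 1
    omega]
  constructor
  · rintro (h | h)
    · exact ⟨hg, Or.inl ((pv_cond_iff _ _ hpre2 hdomp x.toNat hm hkn).mp h)⟩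
    · exact ⟨hg, Or.inr ((pv_cond_iff_rc _ _ hpre2 hdomp x.toNat hm hkn).mp h)⟩
  · rintro ⟨_, (h | h)⟩
    · exact Or.inl ((pv_cond_iff _ _ hpre2 hdomp x.toNat hm hkn).mpr h)
    · exact Or.inr ((pv_cond_iff_rc _ _ hpre2 hdomp x.toNat hm hkn).mpr h)
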